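-- pv_equiv track=rewrite | github.com/TheDukeVin/AMP | dinner_cs1/staff/dinner_solution.py | filter_bad_invites
-- ===== SOURCE A (Python) =====
-- def find_dislikes(friends: dict) -> set[tuple]:
--     """Given a dictionary-based adjacency list of String-based nodes,
--        returns a set of all edges in the graph (ie. dislikes who can't be invited together).
--
--        An edge should only appear once in the list.
--        Each edge should list node connections in alphabetical order.
--
--        Example
--        -------
--        >>>friends = {
--            'Alice':['Bob'],
--            'Bob':['Alice', 'Eve'],
--            'Eve':['Bob']
--        }
--        >>>find_dislikes(friends)
--        {('Alice','Bob'),('Bob','Eve')}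
--
--     """
--     dislikes = set()
--     for edge in friends.items():
--         for node in edge[1]:
--             new_edge = tuple(sorted([edge[0], node]))
--             dislikes.add(new_edge)
--
--     return dislikes
--
-- def filter_bad_invites(all_subsets: list, friends: dict) -> list:
--     """Removes subsets from all_subsets that contain any pair of friends who
--        are in a dislike relationship
--
--        Example
--        -------
--        >>>all_subsets = [[], ['Eve'], ['Bob'], ['Bob', 'Eve'], ['Alice'], ['Alice', 'Eve'], ['Alice', 'Bob'], ['Alice', 'Bob', 'Eve']]
--        >>>friends = {
--            'Alice': ['Bob'],
--            'Bob': ['Alice'],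
--            'Eve': []
--        }
--        >>>filter_bad_invites(all_subsets, friends)
--        [[], ['Eve'], ['Bob'], ['Bob', 'Eve'], ['Alice'], ['Alice', 'Eve']]
--     """
--     good_invites = []
--
--     dislike_pairs = find_dislikes(friends)
--
--     for subset in all_subsets:
--         good = True
--         for dislike in dislike_pairs:
--             if dislike[0] in subset and dislike[1] in subset:
--                 good = False
--         if good:
--             good_invites.append(subset)
--
--     return good_invites
-- ===== SOURCE B (Python) =====
-- def filter_bad_invites(all_subsets: list, friends: dict) -> list:
--     # Build a symmetric set of ordered dislike pairs, then drive the check off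
--     # each subset itself with early exit (scan pairs x=s[i], y in s[i:]).
--     dislikes = set()
--     for name, enemies in friends.items():
--         for e in enemies:
--             dislikes.add((name, e))
--             dislikes.add((e, name))
--
--     def is_bad(subset):
--         for i, x in enumerate(subset):
--             for y in subset[i:]:
--                 if (x, y) in dislikes:
--                     return True
--         return False
--
--     return [s for s in all_subsets if not is_bad(s)]
-- ===== Notes on version B (the rewrite author's own statement) =====
-- stated objective: faster
-- what changed: B builds a symmetric set of ordered dislike pairs once and, for each subset, scans the subset's own ordered pairs (x=s[i], y in s[i:]) with early exit, instead of A's per-subset full scan of every sorted dislike edge with a boolean flag.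
import Mathlib
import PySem

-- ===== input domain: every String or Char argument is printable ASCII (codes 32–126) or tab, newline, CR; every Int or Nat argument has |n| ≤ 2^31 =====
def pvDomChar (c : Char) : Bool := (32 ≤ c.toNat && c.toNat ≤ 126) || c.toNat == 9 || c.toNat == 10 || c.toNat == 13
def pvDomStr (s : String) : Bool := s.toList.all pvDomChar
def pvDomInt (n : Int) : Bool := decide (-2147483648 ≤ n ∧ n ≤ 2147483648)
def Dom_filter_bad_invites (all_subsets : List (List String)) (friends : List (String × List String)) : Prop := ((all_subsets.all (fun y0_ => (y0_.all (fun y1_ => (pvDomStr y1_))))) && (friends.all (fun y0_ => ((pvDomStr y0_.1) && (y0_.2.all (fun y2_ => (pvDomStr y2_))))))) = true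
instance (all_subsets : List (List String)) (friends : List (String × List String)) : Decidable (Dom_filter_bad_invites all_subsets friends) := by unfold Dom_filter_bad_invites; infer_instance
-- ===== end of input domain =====

-- B drives the dislike check off each subset's own ordered pairs (early exit) against a
-- symmetric edge set, instead of A's scan of every sorted edge per subset; same return value.

-- ===== PORT A =====
-- tuple(sorted([a, b])): sort the 2-element list, return it as a pair (the wildcard arm is unreachable)
def pvSortPair (a b : String) : String × String :=
  match PySem.List.sorted [a, b] (fun x => x) false with
  | [x, y] => (x, y)
  | _ => (a, b)

def find_dislikes (friends : List (String × List String)) : PySem.Set (String × String) :=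
  friends.foldl (fun dislikes edge =>
    edge.2.foldl (fun dislikes node => PySem.Set.add dislikes (pvSortPair edge.1 node)) dislikes)
    PySem.Set.empty

def filter_bad_invites (all_subsets : List (List String)) (friends : List (String × List String)) : List (List String) :=
  let dislike_pairs := find_dislikes friends
  all_subsets.foldl (fun good_invites subset =>
    let good := dislike_pairs.foldl (fun good dislike =>
      if subset.contains dislike.1 && subset.contains dislike.2 then false else good) true
    if good then good_invites ++ [subset] else good_invites) []

-- ===== PORT B =====
-- the two inner loops of is_bad: for i, x in enumerate(subset): for y in subset[i:]: …
def pvIsBad (dislikes : PySem.Set (String × String)) : List String → Bool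
  | [] => false
  | x :: rest => (x :: rest).any (fun y => PySem.Set.contains dislikes (x, y)) || pvIsBad dislikes rest

def filter_bad_invites_alt (all_subsets : List (List String)) (friends : List (String × List String)) : List (List String) :=
  let dislikes := friends.foldl (fun d e =>
    e.2.foldl (fun d n => PySem.Set.add (PySem.Set.add d (e.1, n)) (n, e.1)) d)
    PySem.Set.empty
  all_subsets.filter (fun s => !pvIsBad dislikes s)

-- ===== PRECONDITION & SPEC =====
def Spec_filter_bad_invites (all_subsets : List (List String)) (friends : List (String × List String)) (out : List (List String)) : Prop := out = filter_bad_invites_alt all_subsets friends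
instance (all_subsets : List (List String)) (friends : List (String × List String)) (out : List (List String)) : Decidable (Spec_filter_bad_invites all_subsets friends out) := by unfold Spec_filter_bad_invites; infer_instance

-- ===== CLAIM (what is proved, stated in full; the proofs are below) =====
def Claim_equal_filter_bad_invites : Prop := ∀ (all_subsets : List (List String)) (friends : List (String × List String)), Dom_filter_bad_invites all_subsets friends → Spec_filter_bad_invites all_subsets friends (filter_bad_invites all_subsets friends)

-- ===== LEMMAS AND PROOFS =====

lemma pvSortPair_cases (a b : String) : pvSortPair a b = (a, b) ∨ pvSortPair a b = (b, a) := by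
  unfold pvSortPair
  simp only [PySem.List.sorted, PySem.List.insertBy, List.foldl]
  split_ifs <;> simp

lemma mem_find_dislikes (friends : List (String × List String)) (acc : PySem.Set (String × String)) (d : String × String) :
    d ∈ friends.foldl (fun dislikes edge =>
      edge.2.foldl (fun dislikes node => PySem.Set.add dislikes (pvSortPair edge.1 node)) dislikes) acc
    ↔ d ∈ acc ∨ ∃ e ∈ friends, ∃ n ∈ e.2, d = pvSortPair e.1 n := by
  induction friends generalizing acc with
  | nil => simp
  | cons e fr ih =>
    simp only [List.foldl, ih, PySem.Set.mem_foldl_add, List.mem_cons]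
    aesop

lemma mem_alt_set (friends : List (String × List String)) (acc : PySem.Set (String × String)) (p : String × String) :
    p ∈ friends.foldl (fun d e =>
      e.2.foldl (fun d n => PySem.Set.add (PySem.Set.add d (e.1, n)) (n, e.1)) d) acc
    ↔ p ∈ acc ∨ ∃ e ∈ friends, ∃ n ∈ e.2, p = (e.1, n) ∨ p = (n, e.1) := by
  induction friends generalizing acc with
  | nil => simp
  | cons e fr ih =>
    have inner : ∀ (l : List String) (a : PySem.Set (String × String)),
        p ∈ l.foldl (fun d n => PySem.Set.add (PySem.Set.add d (e.1, n)) (n, e.1)) a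
        ↔ p ∈ a ∨ ∃ n ∈ l, p = (e.1, n) ∨ p = (n, e.1) := by
      intro l
      induction l with
      | nil => simp
      | cons n t iht =>
        intro a
        simp only [List.foldl, iht, PySem.Set.mem_add, List.mem_cons]
        aesop
    simp only [List.foldl, ih, inner, List.mem_cons]
    aesop

lemma pvIsBad_iff (dis : PySem.Set (String × String))
    (hsym : ∀ x y, (x, y) ∈ dis → (y, x) ∈ dis) (s : List String) :
    pvIsBad dis s = true ↔ ∃ x ∈ s, ∃ y ∈ s, (x, y) ∈ dis := by
  induction s with
  | nil => simp [pvIsBad]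
  | cons x rest ih =>
    simp only [pvIsBad, Bool.or_eq_true, List.any_eq_true, PySem.Set.contains_iff, ih,
      List.mem_cons]
    aesop

lemma bad_iff_bad (friends : List (String × List String)) (s : List String) :
    pvIsBad (friends.foldl (fun d e =>
        e.2.foldl (fun d n => PySem.Set.add (PySem.Set.add d (e.1, n)) (n, e.1)) d)
        PySem.Set.empty) s = true
    ↔ ∃ d ∈ find_dislikes friends, d.1 ∈ s ∧ d.2 ∈ s := by
  set dis := friends.foldl (fun d e =>
    e.2.foldl (fun d n => PySem.Set.add (PySem.Set.add d (e.1, n)) (n, e.1)) d)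
    PySem.Set.empty with hdis
  have hmemB : ∀ p : String × String,
      p ∈ dis ↔ ∃ e ∈ friends, ∃ n ∈ e.2, p = (e.1, n) ∨ p = (n, e.1) := by
    intro p; rw [hdis, mem_alt_set]; simp [PySem.Set.empty]
  have hsym : ∀ x y, (x, y) ∈ dis → (y, x) ∈ dis := by
    intro x y h
    rw [hmemB] at h ⊢
    obtain ⟨e, he, n, hn, hd⟩ := h
    refine ⟨e, he, n, hn, ?_⟩
    rcases hd with h | h
    · exact Or.inr (by simpa using congrArg Prod.swap h)
    · exact Or.inl (by simpa using congrArg Prod.swap h)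
  rw [pvIsBad_iff dis hsym s]
  have hmemA : ∀ d : String × String,
      d ∈ find_dislikes friends ↔ ∃ e ∈ friends, ∃ n ∈ e.2, d = pvSortPair e.1 n := by
    intro d; unfold find_dislikes; rw [mem_find_dislikes]; simp [PySem.Set.empty]
  constructor
  · rintro ⟨x, hx, y, hy, hmem⟩
    rw [hmemB] at hmem
    obtain ⟨e, he, n, hn, hd⟩ := hmem
    refine ⟨pvSortPair e.1 n, (hmemA _).2 ⟨e, he, n, hn, rfl⟩, ?_⟩
    rcases pvSortPair_cases e.1 n with hs | hs <;> rw [hs] <;>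
      rcases hd with h | h <;> cases h <;> exact ⟨by assumption, by assumption⟩
  · rintro ⟨d, hd, h1, h2⟩
    rw [hmemA] at hd
    obtain ⟨e, he, n, hn, hd⟩ := hd
    have hp : (e.1, n) ∈ dis := (hmemB _).2 ⟨e, he, n, hn, Or.inl rfl⟩
    rcases pvSortPair_cases e.1 n with hs | hs <;> rw [hs] at hd <;> subst hd
    · exact ⟨e.1, h1, n, h2, hp⟩
    · exact ⟨e.1, h2, n, h1, hp⟩

-- ===== VERDICT (by name: the statement is the Claim_ definition above) =====
theorem filter_bad_invites_spec : Claim_equal_filter_bad_invites := by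
  intro all_subsets friends _
  unfold Spec_filter_bad_invites filter_bad_invites filter_bad_invites_alt
  rw [PySem.List.foldl_append_if_eq_filter, List.nil_append]
  apply List.filter_congr
  intro s _
  rw [PySem.List.foldl_if_false_eq, Bool.true_and]
  congr 1
  rw [Bool.eq_iff_iff, List.any_eq_true, bad_iff_bad]
  constructor
  · rintro ⟨d, hd, hc⟩
    simp only [Bool.and_eq_true, List.contains_iff_mem ] at hc
    exact ⟨d, hd, hc.1, hc.2⟩
  · rintro ⟨d, hd, h1, h2⟩
    exact ⟨d, hd, by simp [h1, h2]⟩
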